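-- pv_equiv track=rewrite | github.com/guillaume-thiry/Advent-of-Code-2025 | day_6/day_6.py | parse_horizontally
-- ===== SOURCE A (Python) =====
-- def parse_horizontally(mat: list[str]) -> list[list[str]]:
--     n = len(mat)
--     m = len(mat[0])
--     res = []
--     current_group = []
--     for j in range(m):
--         val = ''
--         for i in range(n):
--             x = mat[i][j]
--             if x != ' ':
--                 val += x
--         if val == '':
--             res.append(current_group)
--             current_group = []
--         else:
--             current_group.append(val)
--     res.append(current_group)
--     return res
-- ===== SOURCE B (Python) =====
-- def parse_horizontally(mat: list[str]) -> list[list[str]]: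
--     m = len(mat[0])
--     # Pass 1: row-major sweep — walk the rows once, accreting every column's chars at once.
--     buckets = [[] for _ in range(m)]
--     for row in mat:
--         for j in range(m):
--             if row[j] != ' ':
--                 buckets[j].append(row[j])
--     cols = [''.join(b) for b in buckets]
--     # Pass 2: find the blank-column boundaries, then cut the groups out as slices.
--     blanks = [j for j in range(m) if cols[j] == '']
--     bounds = [-1] + blanks + [m]
--     return [cols[a + 1:b] for a, b in zip(bounds, bounds[1:])]
-- ===== Notes on version B (the rewrite author's own statement) =====
-- stated objective: alternative
-- what changed: B sweeps the matrix row-major once, appending each non-space character into an array of per-column buckets that are joined into the column strings afterwards (instead of A's column-major re-scan of all rows per column), then forms the groups by collecting the blank-column boundary indices and cutting the column list into pairwise slices between consecutive bounds, instead of A's running current_group accumulator loop.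
import Mathlib
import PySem

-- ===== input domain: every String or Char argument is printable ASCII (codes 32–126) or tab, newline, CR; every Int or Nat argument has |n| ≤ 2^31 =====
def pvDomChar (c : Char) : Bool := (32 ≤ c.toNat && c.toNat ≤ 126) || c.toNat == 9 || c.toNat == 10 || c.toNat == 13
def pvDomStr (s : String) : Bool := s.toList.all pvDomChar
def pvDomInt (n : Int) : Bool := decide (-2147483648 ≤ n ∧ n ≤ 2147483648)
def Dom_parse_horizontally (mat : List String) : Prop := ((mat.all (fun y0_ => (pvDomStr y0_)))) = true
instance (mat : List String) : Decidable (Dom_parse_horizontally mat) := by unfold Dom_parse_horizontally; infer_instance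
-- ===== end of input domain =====

-- B sweeps the matrix row-major once into per-column accumulators and then cuts the
-- column list into groups as pairwise slices between the blank-column boundary indices,
-- instead of A's column-major interleaved loop with a running current_group.

-- ===== PORT A =====
-- A's single pass over columns j with state (res, current_group): build val by appending
-- the non-space chars mat[i][j] top-down, flush current_group when val is empty.
-- val is kept as a List Char (Python's '' with '+= x'); the stored string is String.ofList val.
def parse_horizontally (mat : List String) : List (List String) :=
  let n := mat.length
  let m := (mat.headD "").toList.length     -- len(mat[0]); mat = [] raises and is excluded by Pre_
  let st := (List.range m).foldl (fun (st : List (List String) × List String) j =>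
    let val := (List.range n).foldl (fun (val : List Char) i =>
      -- x = mat[i][j] (inlined); j out of range for row i raises and is excluded by Pre_
      if (mat.getD i "").toList.getD j ' ' ≠ ' '
      then val ++ [(mat.getD i "").toList.getD j ' ']
      else val) []
    if val = [] then (st.1 ++ [st.2], [])
    else (st.1, st.2 ++ [String.ofList val])) ([], [])
  st.1 ++ [st.2]

-- ===== PORT B =====
-- Source B's pass 1: buckets = [[] for _ in range(m)], then for each row, for j in range(m),
-- buckets[j].append(row[j]) when row[j] != ' ' (list mutation = List.set at j), and
-- cols = [''.join(b) for b in buckets] (joining a list of single chars = String.ofList).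
-- Pass 2: blanks = [j for j in range(m) if cols[j] == ''] (cols[j] with j < m = len(cols)
-- never raises, ported as getD), bounds = [-1] + blanks + [m], and the groups are the
-- slices cols[a+1:b] over consecutive bound pairs (zip(bounds, bounds[1:]) = zip with tail).
def parse_horizontally_alt (mat : List String) : List (List String) :=
  let m := (mat.headD "").toList.length     -- len(mat[0]); mat = [] raises and is excluded by Pre_
  let buckets := mat.foldl (fun (buckets : List (List Char)) row =>
    (List.range m).foldl (fun (buckets : List (List Char)) j =>
      -- row[j]; j out of range for this row raises and is excluded by Pre_
      if row.toList.getD j ' ' ≠ ' '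
      then buckets.set j (buckets.getD j [] ++ [row.toList.getD j ' '])
      else buckets) buckets) (List.replicate m [])
  let cols := buckets.map (fun b => String.ofList b)
  let blanks := (List.range m).filter (fun j => cols.getD j "" = "")
  let bounds : List Int := -1 :: (blanks.map (fun j => Int.ofNat j) ++ [Int.ofNat m])
  (bounds.zip bounds.tail).map (fun ab => PySem.List.slice cols (some (ab.1 + 1)) (some ab.2))

-- ===== PRECONDITION & SPEC =====
-- Pre_ excludes exactly the inputs where Python A raises an IndexError: the empty
-- matrix (mat[0]) and matrices with some row shorter than the first row (mat[i][j]).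
def Pre_parse_horizontally (mat : List String) : Prop :=
  mat ≠ [] ∧ ∀ s ∈ mat, (mat.headD "").toList.length ≤ s.toList.length
instance (mat : List String) : Decidable (Pre_parse_horizontally mat) := by
  unfold Pre_parse_horizontally; infer_instance

def pvWitness_parse_horizontally : List String := ["ab c", "cd e"]

def Spec_parse_horizontally (mat : List String) (out : List (List String)) : Prop := out = parse_horizontally_alt mat
instance (mat : List String) (out : List (List String)) : Decidable (Spec_parse_horizontally mat out) := by unfold Spec_parse_horizontally; infer_instance

-- ===== CLAIM (what is proved, stated in full; the proofs are below) =====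
def Claim_equal_parse_horizontally : Prop := ∀ (mat : List String), Dom_parse_horizontally mat → Pre_parse_horizontally mat → Spec_parse_horizontally mat (parse_horizontally mat)

-- ===== LEMMAS AND PROOFS =====

-- The common grouping step (split a column list at its empty strings), named for the proofs.
def pvStepB (col : String) (groups : List (List String)) : List (List String) :=
  if col = "" then [] :: groups
  else match groups with
    | g :: gs => (col :: g) :: gs
    | [] => [[col]]

theorem pvSplitR_ne_nil (cols : List String) : cols.foldr pvStepB [[]] ≠ [] := by
  cases cols with
  | nil => simp
  | cons c t =>
    simp only [List.foldr_cons, pvStepB]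
    split
    · simp
    · split <;> simp_all

-- prepend cur onto the first group of the split
def pvConsHead (cur : List String) : List (List String) → List (List String)
  | [] => [cur]
  | g :: gs => (cur ++ g) :: gs

theorem pvConsHead_nil_of_ne_nil (gs : List (List String)) (h : gs ≠ []) :
    pvConsHead [] gs = gs := by
  cases gs with
  | nil => exact absurd rfl h
  | cons g gs => simp [pvConsHead]

-- A's grouping fold over any column list equals the right-fold split.
theorem pv_groups_eq (cols : List String) (res : List (List String)) (cur : List String) :
    (cols.foldl (fun (st : List (List String) × List String) col =>
        if col = "" then (st.1 ++ [st.2], []) else (st.1, st.2 ++ [col])) (res, cur)).1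
      ++ [(cols.foldl (fun (st : List (List String) × List String) col =>
        if col = "" then (st.1 ++ [st.2], []) else (st.1, st.2 ++ [col])) (res, cur)).2]
      = res ++ pvConsHead cur (cols.foldr pvStepB [[]]) := by
  induction cols generalizing res cur with
  | nil => simp [pvConsHead]
  | cons c t ih =>
    simp only [List.foldl_cons, List.foldr_cons]
    by_cases hc : c = ""
    · simp only [hc, ih, pvStepB]
      have h := pvSplitR_ne_nil t
      cases hh : t.foldr pvStepB [[]] with
      | nil => exact absurd hh h
      | cons g gs => simp [pvConsHead, List.append_assoc]
    · simp only [if_neg hc, ih, pvStepB]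
      have h := pvSplitR_ne_nil t
      cases hh : t.foldr pvStepB [[]] with
      | nil => exact absurd hh h
      | cons g gs => simp [pvConsHead, List.append_assoc]

-- A's char-appending loop for column j builds exactly the filtered column.
theorem pv_val_eq (mat : List String) (j : Nat) :
    (List.range mat.length).foldl (fun (val : List Char) i =>
      if (mat.getD i "").toList.getD j ' ' ≠ ' '
      then val ++ [(mat.getD i "").toList.getD j ' ']
      else val) []
    = ((List.range mat.length).filter
        (fun i => (mat.getD i "").toList.getD j ' ' ≠ ' ')).map
      (fun i => (mat.getD i "").toList.getD j ' ') := by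
  rw [PySem.List.foldl_append_ite
    (p := fun i => (mat.getD i "").toList.getD j ' ' ≠ ' ')
    (f := fun i => (mat.getD i "").toList.getD j ' '), List.nil_append]

-- the non-space characters of column j, read row by row
def pvColChars (rows : List String) (j : Nat) : List Char :=
  (rows.map (fun r => r.toList.getD j ' ')).filter (fun c => c ≠ ' ')

theorem pv_getD_set {α : Type} (d : α) (l : List α) (i : Nat) (v : α) (k : Nat) :
    (l.set i v).getD k d = if i = k ∧ i < l.length then v else l.getD k d := by
  simp only [List.getD_eq_getElem?_getD, List.getElem?_set]
  split_ifs with h1 h2 h2 <;> simp_all <;> omega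

theorem pv_range_getD (l : List String) :
    (List.range l.length).map (fun i => l.getD i "") = l := by
  apply List.ext_getElem
  · simp
  · intro i h1 h2
    simp [List.getD_eq_getElem?_getD, List.getElem?_eq_getElem h2]

-- one inner loop of B's pass 1: the fold over range m with set touches each index once
theorem pv_setfold {α : Type} (d : α) (p : Nat → Prop) [DecidablePred p] (g : Nat → α → α)
    (m : Nat) (s : List α) (hm : m ≤ s.length) :
    ((List.range m).foldl (fun cs j => if p j then cs.set j (g j (cs.getD j d)) else cs) s).length = s.length
    ∧ ∀ k, ((List.range m).foldl (fun cs j => if p j then cs.set j (g j (cs.getD j d)) else cs) s).getD k d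
        = if k < m ∧ p k then g k (s.getD k d) else s.getD k d := by
  induction m with
  | zero => simp
  | succ m ih =>
    have ih := ih (by omega)
    rw [List.range_succ, List.foldl_append, List.foldl_cons, List.foldl_nil]
    by_cases hp : p m
    · rw [if_pos hp]
      constructor
      · rw [List.length_set, ih.1]
      · intro k
        rw [pv_getD_set, ih.1, ih.2 m, ih.2 k]
        by_cases hk : k = m
        · subst hk
          rw [if_pos ⟨rfl, by omega⟩, if_neg (by omega), if_pos ⟨Nat.lt_succ_self _, hp⟩]
        · by_cases hpk : p k
          · simp only [hpk, and_true]
            split_ifs <;> simp_all <;> omega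
          · simp only [hpk, and_false, if_false]
            split_ifs <;> simp_all
    · rw [if_neg hp]
      constructor
      · exact ih.1
      · intro k
        rw [ih.2 k]
        by_cases hk : k = m
        · subst hk; simp [hp]
        · by_cases hpk : p k
          · simp only [hpk, and_true]
            split_ifs <;> simp_all <;> omega
          · simp [hpk]

-- B's pass 1 over all rows: each column bucket collects that column's non-space chars
theorem pv_rowfold (m : Nat) (rows : List String) :
    ∀ (s : List (List Char)), s.length = m →
      (rows.foldl (fun (buckets : List (List Char)) row =>
        (List.range m).foldl (fun (buckets : List (List Char)) j =>
          if row.toList.getD j ' ' ≠ ' '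
          then buckets.set j (buckets.getD j [] ++ [row.toList.getD j ' '])
          else buckets) buckets) s).length = m
      ∧ ∀ k, k < m →
        (rows.foldl (fun (buckets : List (List Char)) row =>
          (List.range m).foldl (fun (buckets : List (List Char)) j =>
            if row.toList.getD j ' ' ≠ ' '
            then buckets.set j (buckets.getD j [] ++ [row.toList.getD j ' '])
            else buckets) buckets) s).getD k []
        = s.getD k [] ++ pvColChars rows k := by
  induction rows with
  | nil =>
    intro s hs
    exact ⟨hs, by intro k hk; simp [pvColChars]⟩
  | cons row rest ih =>
    intro s hs
    rw [List.foldl_cons]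
    have h1 := pv_setfold ([] : List Char) (fun j => row.toList.getD j ' ' ≠ ' ')
      (fun j x => x ++ [row.toList.getD j ' ']) m s (by omega)
    beta_reduce at h1
    have h2 := ih _ (h1.1.trans hs)
    refine ⟨h2.1, ?_⟩
    intro k hk
    rw [h2.2 k hk, h1.2 k]
    have hchar : pvColChars (row :: rest) k
        = (if row.toList.getD k ' ' ≠ ' ' then [row.toList.getD k ' '] else []) ++ pvColChars rest k := by
      simp only [pvColChars, List.map_cons, List.filter_cons]
      split_ifs <;> simp_all
    rw [hchar]
    by_cases hp : row.toList.getD k ' ' = ' '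
    · rw [if_neg (fun h => h.2 hp), if_neg (not_not_intro hp)]
      simp
    · rw [if_pos ⟨hk, hp⟩, if_pos hp]
      simp

-- B's cols after pass 1, as a map over column indices
theorem pv_cols_eq (m : Nat) (mat : List String) :
    (mat.foldl (fun (buckets : List (List Char)) row =>
      (List.range m).foldl (fun (buckets : List (List Char)) j =>
        if row.toList.getD j ' ' ≠ ' '
        then buckets.set j (buckets.getD j [] ++ [row.toList.getD j ' '])
        else buckets) buckets) (List.replicate m [])).map (fun b => String.ofList b)
    = (List.range m).map (fun j => String.ofList (pvColChars mat j)) := by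
  have h := pv_rowfold m mat (List.replicate m []) (by simp)
  have hbk : mat.foldl (fun (buckets : List (List Char)) row =>
      (List.range m).foldl (fun (buckets : List (List Char)) j =>
        if row.toList.getD j ' ' ≠ ' '
        then buckets.set j (buckets.getD j [] ++ [row.toList.getD j ' '])
        else buckets) buckets) (List.replicate m [])
      = (List.range m).map (fun j => pvColChars mat j) := by
    apply List.ext_getElem
    · rw [h.1, List.length_map, List.length_range]
    · intro i h1 h2
      have hi : i < m := by simpa using h2
      have hg := h.2 i hi
      rw [← List.getD_eq_getElem _ [] h1, hg]
      simp [List.getD_eq_getElem?_getD, hi]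
  rw [hbk, List.map_map]
  rfl

-- A's per-column string (indexed over range n) is the row-wise pvColChars
theorem pv_col_eq_val (mat : List String) (j : Nat) :
    ((List.range mat.length).filter
        (fun i => (mat.getD i "").toList.getD j ' ' ≠ ' ')).map
      (fun i => (mat.getD i "").toList.getD j ' ') = pvColChars mat j := by
  unfold pvColChars
  conv_rhs => rw [← pv_range_getD mat]
  rw [List.map_map, List.filter_map]
  rfl

theorem pv_foldr_no_blank (cols : List String) (h : "" ∉ cols) :
    cols.foldr pvStepB [[]] = [cols] := by
  induction cols with
  | nil => rfl
  | cons c t ih =>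
    simp only [List.mem_cons, not_or] at h
    rw [List.foldr_cons, ih h.2]
    simp only [pvStepB]
    split_ifs with hc
    · exact absurd hc.symm h.1
    · rfl

theorem pv_foldr_split (pre suf : List String) (h : "" ∉ pre) :
    (pre ++ "" :: suf).foldr pvStepB [[]] = pre :: suf.foldr pvStepB [[]] := by
  induction pre with
  | nil => simp [pvStepB]
  | cons p ps ih =>
    simp only [List.mem_cons, not_or] at h
    rw [List.cons_append, List.foldr_cons, ih h.2]
    simp only [pvStepB]
    split_ifs with hc
    · exact absurd hc.symm h.1
    · rfl

-- proof-side names for B's pass 2: the bound list and the pairwise-slice map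
def pvBoundsF (l : List String) : List Int :=
  -1 :: (((List.range l.length).filter (fun j => l.getD j "" = "")).map (fun j => Int.ofNat j) ++ [Int.ofNat l.length])

def pvSG (l : List String) (bs : List Int) : List (List String) :=
  (bs.zip bs.tail).map (fun ab => PySem.List.slice l (some (ab.1 + 1)) (some ab.2))

theorem pv_getD_mid (pre suf : List String) :
    (pre ++ "" :: suf).getD pre.length "" = "" := by
  rw [List.getD_append_right _ _ _ _ le_rfl]
  simp

theorem pv_getD_shift (pre suf : List String) (j : Nat) :
    (pre ++ "" :: suf).getD (pre.length + 1 + j) "" = suf.getD j "" := by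
  rw [List.getD_append_right _ _ _ _ (by omega)]
  have h : pre.length + 1 + j - pre.length = j + 1 := by omega
  rw [h]
  simp

-- the blank indices of pre ++ "" :: suf: pre.length, then suf's blank indices shifted
theorem pv_blanks_split (pre suf : List String) (hpre : "" ∉ pre) :
    (List.range (pre ++ "" :: suf).length).filter (fun j => (pre ++ "" :: suf).getD j "" = "")
    = pre.length :: ((List.range suf.length).filter (fun j => suf.getD j "" = "")).map
        (fun j => pre.length + 1 + j) := by
  have hlen : (pre ++ "" :: suf).length = (pre.length + 1) + suf.length := by
    simp
    omega
  rw [hlen, List.range_add, List.filter_append, List.filter_map]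
  have h1 : (List.range (pre.length + 1)).filter
      (fun j => decide ((pre ++ "" :: suf).getD j "" = "")) = [pre.length] := by
    rw [List.range_succ, List.filter_append]
    have h0 : (List.range pre.length).filter
        (fun j => decide ((pre ++ "" :: suf).getD j "" = "")) = [] := by
      rw [List.filter_eq_nil_iff]
      intro j hj
      rw [List.mem_range] at hj
      simp only [decide_eq_true_eq]
      rw [List.getD_append _ _ _ _ hj, List.getD_eq_getElem _ _ hj]
      exact fun hc => hpre (hc ▸ List.getElem_mem hj)
    rw [h0, List.nil_append, List.filter_singleton]
    simp [pv_getD_mid]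
  rw [h1]
  have h2 : (List.range suf.length).filter
        ((fun j => decide ((pre ++ "" :: suf).getD j "" = "")) ∘ (fun x => pre.length + 1 + x))
      = (List.range suf.length).filter (fun j => suf.getD j "" = "") := by
    apply List.filter_congr
    intro j _
    simp only [Function.comp_apply, pv_getD_shift]
  rw [h2]
  rfl

-- the bound list of pre ++ "" :: suf is suf's bound list shifted by pre.length + 1
theorem pv_bounds_split (pre suf : List String) (hpre : "" ∉ pre) :
    pvBoundsF (pre ++ "" :: suf)
    = -1 :: (pvBoundsF suf).map (fun x => x + ((pre.length : Int) + 1)) := by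
  unfold pvBoundsF
  rw [pv_blanks_split pre suf hpre]
  simp only [Int.ofNat_eq_natCast, List.map_cons, List.map_append, List.map_map,
    List.cons_append, List.map_nil, List.length_append, List.length_cons]
  congr 2
  · omega
  congr 1
  · apply List.map_congr_left
    intro j _
    simp only [Function.comp_apply]
    push_cast
    ring
  · congr 1
    push_cast
    ring

-- slicing pre' ++ suf beyond pre' is slicing suf
theorem pv_slice_shift (pre' suf : List String) (a b : Int) (ha : -1 ≤ a) (hb : 0 ≤ b) :
    PySem.List.slice (pre' ++ suf) (some (a + (pre'.length : Int) + 1)) (some (b + (pre'.length : Int)))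
    = PySem.List.slice suf (some (a + 1)) (some b) := by
  obtain ⟨x, hx⟩ : ∃ x : Nat, a + 1 = (x : Int) := ⟨(a + 1).toNat, by omega⟩
  obtain ⟨y, hy⟩ : ∃ y : Nat, b = (y : Int) := ⟨b.toNat, by omega⟩
  have e1 : a + (pre'.length : Int) + 1 = ((pre'.length + x : Nat) : Int) := by push_cast; omega
  have e2 : b + (pre'.length : Int) = ((pre'.length + y : Nat) : Int) := by push_cast; omega
  rw [e1, e2, hx, hy, PySem.List.slice_natCast, PySem.List.slice_natCast,
    List.drop_length_add_append]
  congr 1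
  omega

-- every bound after the first is ≥ 0 (they are blank indices and the length)
theorem pv_bounds_tail_nonneg (l : List String) : ∀ b ∈ (pvBoundsF l).tail, 0 ≤ b := by
  intro b hb
  unfold pvBoundsF at hb
  simp only [Int.ofNat_eq_natCast, List.tail_cons, List.mem_append, List.mem_map,
    List.mem_singleton] at hb
  rcases hb with ⟨j, _, rfl⟩ | rfl
  · exact Int.natCast_nonneg j
  · exact Int.natCast_nonneg l.length

-- the slice groups of pre ++ "" :: suf are pre followed by the slice groups of suf
theorem pv_SG_split (pre suf : List String) (hpre : "" ∉ pre) :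
    pvSG (pre ++ "" :: suf) (pvBoundsF (pre ++ "" :: suf)) = pre :: pvSG suf (pvBoundsF suf) := by
  rw [pv_bounds_split pre suf hpre]
  have hBF : pvBoundsF suf = -1 :: (pvBoundsF suf).tail := by unfold pvBoundsF; rfl
  unfold pvSG
  rw [hBF]
  set c : Int := (pre.length : Int) + 1 with hc
  set B := (pvBoundsF suf).tail with hB
  simp only [List.map_cons, List.tail_cons, List.zip_cons_cons, List.map_cons]
  congr 1
  · -- first slice is pre
    show PySem.List.slice (pre ++ "" :: suf) (some (-1 + 1)) (some (-1 + c)) = pre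
    have h0 : (-1 : Int) + 1 = ((0 : Nat) : Int) := by norm_num
    have h1 : (-1 : Int) + c = ((pre.length : Nat) : Int) := by rw [hc]; ring
    rw [h0, h1, PySem.List.slice_natCast]
    simp [List.take_left]
  · -- remaining slices are suf's slices, shifted across pre ++ [""]
    have hzip : (((-1 + c) :: B.map (fun x => x + c)).zip (B.map (fun x => x + c)))
        = ((-1 :: B).zip B).map (Prod.map (fun x => x + c) (fun x => x + c)) := by
      rw [← List.zip_map]
      rfl
    rw [hzip, List.map_map]
    apply List.map_congr_left
    intro ab hab
    have hab' : (ab.1, ab.2) ∈ (-1 :: B).zip B := by rwa [Prod.mk.eta]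
    obtain ⟨ha, hb⟩ := List.of_mem_zip hab'
    have hb' : 0 ≤ ab.2 := pv_bounds_tail_nonneg suf ab.2 (hB ▸ hb)
    have ha' : -1 ≤ ab.1 := by
      rcases List.mem_cons.mp ha with h | h
      · omega
      · have := pv_bounds_tail_nonneg suf ab.1 (hB ▸ h)
        omega
    show PySem.List.slice (pre ++ "" :: suf) (some (ab.1 + c + 1)) (some (ab.2 + c))
        = PySem.List.slice suf (some (ab.1 + 1)) (some ab.2)
    have hcols : pre ++ "" :: suf = (pre ++ [""]) ++ suf := by simp
    have hclen : c = (((pre ++ [""]).length : Nat) : Int) := by simp [hc]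
    rw [hcols, hclen, pv_slice_shift _ _ _ _ ha' hb']

-- B's pass 2 (pairwise slices between bounds) equals the right-fold split
theorem pv_SG_eq (N : Nat) : ∀ cols : List String, cols.length ≤ N →
    pvSG cols (pvBoundsF cols) = cols.foldr pvStepB [[]] := by
  induction N with
  | zero =>
    intro cols h
    have h0 : cols = [] := List.eq_nil_of_length_eq_zero (by omega)
    subst h0
    rfl
  | succ N ih =>
    intro cols hlen
    cases h : PySem.List.index? cols "" with
    | none =>
      have hnot : "" ∉ cols := (PySem.List.index?_eq_none_iff _ _).mp h
      rw [pv_foldr_no_blank cols hnot]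
      have hblanks : (List.range cols.length).filter (fun j => cols.getD j "" = "") = [] := by
        rw [List.filter_eq_nil_iff]
        intro j hj
        rw [List.mem_range] at hj
        simp only [decide_eq_true_eq]
        rw [List.getD_eq_getElem _ _ hj]
        exact fun hc => hnot (hc ▸ List.getElem_mem hj)
      unfold pvSG pvBoundsF
      rw [hblanks]
      simp only [List.map_nil, List.nil_append, List.tail_cons, List.zip_cons_cons,
        List.zip_nil_right, List.map_cons, List.map_nil, Int.ofNat_eq_natCast]
      have h0 : (-1 : Int) + 1 = ((0 : Nat) : Int) := by norm_num
      rw [h0, PySem.List.slice_natCast]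
      simp
    | some k =>
      obtain ⟨pre, suf, rfl, hk, hpre⟩ := (PySem.List.index?_eq_some_iff _ _ _).mp h
      rw [pv_SG_split pre suf hpre, pv_foldr_split pre suf hpre,
        ih suf (by simp at hlen; omega)]

-- bridge: B's pass 2 exactly as it appears in the port
theorem pv_split_slices (cols : List String) (m : Nat) (hm : cols.length = m) :
    ((((-1 : Int) :: (((List.range m).filter (fun j => cols.getD j "" = "")).map (fun j => Int.ofNat j) ++ [Int.ofNat m])).zip
      (((-1 : Int) :: (((List.range m).filter (fun j => cols.getD j "" = "")).map (fun j => Int.ofNat j) ++ [Int.ofNat m])).tail)).map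
      (fun ab => PySem.List.slice cols (some (ab.1 + 1)) (some ab.2)))
    = cols.foldr pvStepB [[]] := by
  subst hm
  exact pv_SG_eq cols.length cols le_rfl

-- ===== VERDICT (by name: the statement is the Claim_ definition above) =====
theorem parse_horizontally_spec : Claim_equal_parse_horizontally := by
  intro mat _ _
  unfold Spec_parse_horizontally parse_horizontally parse_horizontally_alt
  simp only [pv_cols_eq, pv_val_eq]
  rw [pv_split_slices _ _ (by simp)]
  have hstep : (fun (st : List (List String) × List String) (j : Nat) =>
      if ((List.range mat.length).filter
            (fun i => (mat.getD i "").toList.getD j ' ' ≠ ' ')).map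
          (fun i => (mat.getD i "").toList.getD j ' ') = ([] : List Char)
      then (st.1 ++ [st.2], ([] : List String))
      else (st.1, st.2 ++ [String.ofList (((List.range mat.length).filter
            (fun i => (mat.getD i "").toList.getD j ' ' ≠ ' ')).map
          (fun i => (mat.getD i "").toList.getD j ' '))]))
    = fun (st : List (List String) × List String) (j : Nat) =>
      (fun (st : List (List String) × List String) (col : String) =>
        if col = "" then (st.1 ++ [st.2], []) else (st.1, st.2 ++ [col])) st
      (String.ofList (((List.range mat.length).filter
            (fun i => (mat.getD i "").toList.getD j ' ' ≠ ' ')).map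
          (fun i => (mat.getD i "").toList.getD j ' '))) := by
    funext st j
    simp only [String.ofList_eq_empty_iff]
  rw [hstep,
    ← List.foldl_map (f := fun (j : Nat) =>
      String.ofList (((List.range mat.length).filter
            (fun i => (mat.getD i "").toList.getD j ' ' ≠ ' ')).map
          (fun i => (mat.getD i "").toList.getD j ' ')))
    (g := fun (st : List (List String) × List String) (col : String) =>
      if col = "" then (st.1 ++ [st.2], []) else (st.1, st.2 ++ [col])),
    pv_groups_eq, List.nil_append,
    pvConsHead_nil_of_ne_nil _ (pvSplitR_ne_nil _)]
  simp only [pv_col_eq_val]
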